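-- pv_equiv track=rewrite | github.com/Pranavi2002/CodePath-TP-102-Course | Unit-2/demo.py | max_audience_performances
-- ===== SOURCE A (Python) =====
-- def max_audience_performances(audiences):
--     freq_map = {}
--     for size in audiences:
--         if size in freq_map:
--             freq_map[size] += 1
--         else:
--             freq_map[size] = 1
--     maxSize = 0
--     result = 0
--     for key, val in freq_map.items():
--         if key > maxSize:
--             maxSize = key
--             result = maxSize * val
--     return result
-- ===== SOURCE B (Python) =====
-- def max_audience_performances(audiences):
--     if not audiences:
--         return 0
--     m = max(audiences)
--     return m * audiences.count(m) if m > 0 else 0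
-- ===== Notes on version B (the rewrite author's own statement) =====
-- stated objective: simpler
-- what changed: Replaces the frequency-dict build plus key scan with two direct library passes (max, then count), keeping no dictionary; the C-level passes beat per-element dict updates.
import Mathlib
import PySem

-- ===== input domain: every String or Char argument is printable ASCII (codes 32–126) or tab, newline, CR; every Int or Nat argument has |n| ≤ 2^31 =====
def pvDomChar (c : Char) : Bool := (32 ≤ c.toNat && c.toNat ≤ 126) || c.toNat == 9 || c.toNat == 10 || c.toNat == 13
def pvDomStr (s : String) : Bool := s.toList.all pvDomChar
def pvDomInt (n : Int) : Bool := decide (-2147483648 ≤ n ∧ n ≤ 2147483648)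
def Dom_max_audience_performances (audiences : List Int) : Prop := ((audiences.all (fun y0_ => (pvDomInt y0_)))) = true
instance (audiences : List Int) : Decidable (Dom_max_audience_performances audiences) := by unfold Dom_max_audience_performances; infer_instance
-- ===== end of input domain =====

-- B replaces A's frequency-dict build-and-scan with two direct library passes (max, then count); same result, no dictionary.

-- ===== PORT A =====
def max_audience_performances (audiences : List Int) : Int :=
  let freq_map : PySem.Dict Int Int := audiences.foldl (fun d size =>
      if d.contains size then d.insert size (d.getD size 0 + 1)
      else d.insert size 1) PySem.Dict.empty
  let p := freq_map.items.foldl (fun p kv =>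
      if p.1 < kv.1 then (kv.1, kv.1 * kv.2) else p) ((0 : Int), (0 : Int))
  p.2

-- ===== PORT B =====
def max_audience_performances_alt (audiences : List Int) : Int :=
  if audiences = [] then 0
  else
    match PySem.List.max? audiences (fun y => y) with
    | none => 0   -- unreachable: audiences is nonempty
    | some m => if 0 < m then m * (PySem.List.count audiences m : Int) else 0

-- ===== PRECONDITION & SPEC =====
def Spec_max_audience_performances (audiences : List Int) (out : Int) : Prop := out = max_audience_performances_alt audiences
instance (audiences : List Int) (out : Int) : Decidable (Spec_max_audience_performances audiences out) := by unfold Spec_max_audience_performances; infer_instance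

-- ===== CLAIM (what is proved, stated in full; the proofs are below) =====
def Claim_equal_max_audience_performances : Prop := ∀ (audiences : List Int), Dom_max_audience_performances audiences → Spec_max_audience_performances audiences (max_audience_performances audiences)

-- ===== LEMMAS AND PROOFS =====

-- A's build loop is exactly the counter loop (in the missing-key branch getD returns 0).
theorem buildLoop_eq_counter (audiences : List Int) :
    audiences.foldl (fun d size =>
      if d.contains size then d.insert size (d.getD size 0 + 1)
      else d.insert size 1) PySem.Dict.empty = PySem.Dict.counter audiences := by
  rw [← PySem.Dict.foldl_insert_getD_add_one_eq_counter]
  congr 1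
  funext d size
  by_cases h : d.contains size = true
  · simp [h]
  · simp only [Bool.not_eq_true] at h
    simp [h, PySem.Dict.getD_of_not_contains d 0 h]

-- A's scan loop over a key list with an associated count function:
-- first component is the running max, second is max*cnt(max) when the max is positive.
theorem scanLoop_char (cnt : Int → Int) : ∀ (ks : List Int) (m0 r0 : Int),
    0 ≤ m0 → (m0 = 0 → r0 = 0) → (0 < m0 → r0 = m0 * cnt m0) →
    ks.foldl (fun p k => if p.1 < k then (k, k * cnt k) else p) (m0, r0)
      = (ks.foldl max m0,
         if 0 < ks.foldl max m0 then (ks.foldl max m0) * cnt (ks.foldl max m0) else 0) := by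
  intro ks
  induction ks with
  | nil =>
    intro m0 r0 h0 hz hp
    simp only [List.foldl_nil]
    by_cases h : 0 < m0
    · simp [h, hp h]
    · have : m0 = 0 := by omega
      simp [this, hz this]
  | cons k t ih =>
    intro m0 r0 h0 hz hp
    simp only [List.foldl_cons]
    by_cases h : m0 < k
    · have hk : 0 < k := by omega
      have hmax : max m0 k = k := max_eq_right (le_of_lt h)
      rw [if_pos h, hmax]
      exact ih k (k * cnt k) (le_of_lt hk) (by omega) (fun _ => rfl)
    · have hmax : max m0 k = m0 := max_eq_left (by omega)
      rw [if_neg h, hmax]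
      exact ih m0 r0 h0 hz hp

-- running max depends only on membership
theorem foldl_max_ext (l1 l2 : List Int) (a : Int) (h : ∀ y, y ∈ l1 ↔ y ∈ l2) :
    l1.foldl max a = l2.foldl max a := by
  apply le_antisymm
  · rcases PySem.List.foldl_max_mem l1 a with he | hm
    · rw [he]; exact (PySem.List.le_foldl_max l2 a).1
    · exact (PySem.List.le_foldl_max l2 a).2 _ ((h _).mp hm)
  · rcases PySem.List.foldl_max_mem l2 a with he | hm
    · rw [he]; exact (PySem.List.le_foldl_max l1 a).1
    · exact (PySem.List.le_foldl_max l1 a).2 _ ((h _).mpr hm)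

-- pull the 0 out of the running max
theorem foldl_max_zero (t : List Int) : ∀ (x : Int),
    t.foldl max (max 0 x) = max 0 (t.foldl max x) := by
  induction t with
  | nil => intro x; rfl
  | cons y t ih =>
    intro x
    simp only [List.foldl_cons, max_assoc]
    exact ih (max x y)

-- ===== VERDICT (by name: the statement is the Claim_ definition above) =====
theorem max_audience_performances_spec : Claim_equal_max_audience_performances := by
  intro audiences _
  unfold Spec_max_audience_performances max_audience_performances max_audience_performances_alt
  match audiences with
  | [] => rfl
  | x :: t =>
    simp only [buildLoop_eq_counter, PySem.Dict.items_counter, List.foldl_map,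
      reduceCtorEq, if_false]
    rw [PySem.List.max?_id_cons]
    rw [scanLoop_char (fun k => ((x :: t).count k : Int)) (PySem.Set.ofList (x :: t)) 0 0
      le_rfl (fun _ => rfl) (fun h => absurd h (by omega))]
    have hM : (PySem.Set.ofList (x :: t)).foldl max 0 = max 0 (t.foldl max x) := by
      rw [foldl_max_ext (PySem.Set.ofList (x :: t)) (x :: t) 0
        (fun y => PySem.Set.mem_ofList (x :: t) y)]
      simp only [List.foldl_cons]
      exact foldl_max_zero t x
    rw [hM]
    set m := t.foldl max x with hm
    by_cases h : 0 < m
    · have : max 0 m = m := max_eq_right (le_of_lt h)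
      simp [this, h, PySem.List.count]
    · have : max 0 m = 0 := max_eq_left (by omega)
      simp [this, h]
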